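-- pv_equiv track=rewrite | github.com/gerryatsxf/planner-app-deprecated | src/script/parse-santander-transactions.py | convert
-- ===== SOURCE A (Python) =====
-- def convert(s):
--     ls = s.split()
--     monthMap = {
--         "Ene":"01",
--         "Feb":"02",
--         "Mar":"03",
--         "Abr":"04",
--         "May":"05",
--         "Jun":"06",
--         "Jul":"07",
--         "Ago":"08",
--         "Sep":"09",
--         "Oct":"10",
--         "Nov":"11",
--         "Dic":"12",
--     }
--     months = monthMap.keys()
--     for month in months:
--         if month in s:
--             s = s.replace(month,monthMap[month])
--             s = s.replace('/','-')
--     return s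
-- ===== SOURCE B (Python) =====
-- import re
--
-- _MONTHS = {
--     "Ene": "01", "Feb": "02", "Mar": "03", "Abr": "04",
--     "May": "05", "Jun": "06", "Jul": "07", "Ago": "08",
--     "Sep": "09", "Oct": "10", "Nov": "11", "Dic": "12",
-- }
-- _PAT = re.compile("|".join(_MONTHS))
--
--
-- def convert(s):
--     s, n = _PAT.subn(lambda m: _MONTHS[m.group(0)], s)
--     if n:
--         s = s.replace('/', '-')
--     return s
-- ===== Notes on version B (the rewrite author's own statement) =====
-- stated objective: idiomatic
-- what changed: A runs 12 separate full-string containment scans and replace passes (re-replacing slashes each time a month is found); B compiles one regex alternation over the 12 Spanish month abbreviations, substitutes them all in a single re.subn pass, and replaces slashes once iff the substitution count is positive.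
import Mathlib
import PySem

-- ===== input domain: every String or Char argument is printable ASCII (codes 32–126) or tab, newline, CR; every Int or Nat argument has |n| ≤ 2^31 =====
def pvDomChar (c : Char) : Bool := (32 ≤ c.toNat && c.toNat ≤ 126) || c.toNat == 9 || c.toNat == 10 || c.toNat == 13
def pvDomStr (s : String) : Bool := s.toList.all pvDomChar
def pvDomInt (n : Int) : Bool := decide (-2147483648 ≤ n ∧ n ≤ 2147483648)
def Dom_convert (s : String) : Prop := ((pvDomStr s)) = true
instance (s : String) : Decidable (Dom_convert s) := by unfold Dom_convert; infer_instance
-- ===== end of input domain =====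

-- B replaces A's 12 separate containment-scan + replace passes by ONE left-to-right
-- substitution pass over the string (a regex-alternation scan in Python), with the
-- slash replacement done once iff the substitution count is positive; same return value.

-- ===== PORT A =====
def monthPairs : List (String × String) :=
  [("Ene","01"),("Feb","02"),("Mar","03"),("Abr","04"),("May","05"),("Jun","06"),
   ("Jul","07"),("Ago","08"),("Sep","09"),("Oct","10"),("Nov","11"),("Dic","12")]

def convert (s : String) : String :=
  let _ls := PySem.Str.split₀ s
  let monthMap : PySem.Dict String String := PySem.Dict.ofList monthPairs
  let months := monthMap.keys
  -- monthMap[month]: month always comes from monthMap.keys, so getD is exact (no KeyError)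
  months.foldl (fun t month =>
    if PySem.Str.isIn month t then
      let t₁ := PySem.Str.replace t month (PySem.Dict.getD monthMap month "")
      PySem.Str.replace t₁ "/" "-"
    else t) s

-- ===== PORT B =====
-- the 12 (month-abbreviation, number) pairs as character lists
def monthKC : List (List Char × List Char) :=
  [(['E','n','e'],['0','1']),(['F','e','b'],['0','2']),(['M','a','r'],['0','3']),
   (['A','b','r'],['0','4']),(['M','a','y'],['0','5']),(['J','u','n'],['0','6']),
   (['J','u','l'],['0','7']),(['A','g','o'],['0','8']),(['S','e','p'],['0','9']),
   (['O','c','t'],['1','0']),(['N','o','v'],['1','1']),(['D','i','c'],['1','2'])]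

-- the replacement-function lookup of B: the month dict keyed by the matched text
def monthSub (c0 c1 c2 : Char) : Option (List Char) :=
  (monthKC.find? (fun p => p.1 == [c0, c1, c2])).map (·.2)

-- B's single left-to-right pattern-matching pass (re.subn over the 12-key alternation):
-- at each position try the three-character month keys; substitute and count, else keep the char
def subnMonths : List Char → List Char × Nat
  | c0 :: c1 :: c2 :: rest =>
    match monthSub c0 c1 c2 with
    | some v => let p := subnMonths rest; (v ++ p.1, p.2 + 1)
    | none => let p := subnMonths (c1 :: c2 :: rest); (c0 :: p.1, p.2)
  | l => (l, 0)
termination_by l => l.length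
decreasing_by all_goals (simp only [List.length_cons]; omega)

def convert_alt (s : String) : String :=
  let p := subnMonths s.toList
  -- s.replace('/','-') on a 1-char pattern is exactly a character map
  String.ofList (if p.2 > 0 then p.1.map (fun c => if c == '/' then '-' else c) else p.1)

-- ===== PRECONDITION & SPEC =====
def Spec_convert (s : String) (out : String) : Prop := out = convert_alt s
instance (s : String) (out : String) : Decidable (Spec_convert s out) := by unfold Spec_convert; infer_instance

-- ===== CLAIM (what is proved, stated in full; the proofs are below) =====
def Claim_equal_convert : Prop := ∀ (s : String), Dom_convert s → Spec_convert s (convert s)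

-- ===== LEMMAS AND PROOFS =====

-- slash map
def slashC (c : Char) : Char := if c == '/' then '-' else c
def mS (l : List Char) : List Char := l.map slashC

-- clean recursive form of Python's str.replace for a nonempty pattern
def repC (old new : List Char) : List Char → List Char
  | [] => []
  | c :: t =>
    if old <+: (c :: t) then new ++ repC old new (t.drop (old.length - 1))
    else c :: repC old new t
termination_by l => l.length
decreasing_by all_goals (simp only [List.length_cons, List.length_drop]; omega)

theorem repC_nil (old new : List Char) : repC old new [] = [] := by rw [repC]

theorem repC_cons (old new : List Char) (c : Char) (t : List Char) :
    repC old new (c :: t) = if old <+: (c :: t) then new ++ repC old new (t.drop (old.length - 1))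
    else c :: repC old new t := by rw [repC]

theorem go_zero (old new l acc : List Char) :
    PySem.Chars.replace.go old new 0 l acc = acc.reverse ++ l := by rw [PySem.Chars.replace.go]

theorem go_nilv (old new acc : List Char) (f : Nat) :
    PySem.Chars.replace.go old new (f+1) [] acc = acc.reverse := by
  rw [PySem.Chars.replace.go]; omega

theorem go_consv (old new : List Char) (c : Char) (t acc : List Char) (f : Nat) :
    PySem.Chars.replace.go old new (f+1) (c :: t) acc =
      if old.isPrefixOf (c :: t) then
        PySem.Chars.replace.go old new f (List.drop old.length (c :: t)) (new.reverse ++ acc)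
      else PySem.Chars.replace.go old new f t (c :: acc) := by
  rw [PySem.Chars.replace.go]

theorem go_spec (old new : List Char) (hold : old ≠ []) :
    ∀ fuel l acc, l.length ≤ fuel →
      PySem.Chars.replace.go old new fuel l acc = acc.reverse ++ repC old new l := by
  intro fuel
  induction fuel with
  | zero =>
    intro l acc h
    have hl : l = [] := by cases l with | nil => rfl | cons a t => simp at h
    subst hl
    rw [go_zero, repC_nil]
  | succ f ih =>
    intro l acc h
    cases l with
    | nil => rw [go_nilv, repC_nil]; simp
    | cons c t =>
      obtain ⟨o, os, rfl⟩ : ∃ o os, old = o :: os := by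
        cases old with
        | nil => exact absurd rfl hold
        | cons o os => exact ⟨o, os, rfl⟩
      rw [go_consv]
      by_cases hp : (o :: os) <+: (c :: t)
      · rw [if_pos (List.isPrefixOf_iff_prefix.mpr hp)]
        have hlen : (List.drop (o :: os).length (c :: t)).length ≤ f := by
          simp only [List.length_drop, List.length_cons] at h ⊢; omega
        rw [ih _ _ hlen, repC_cons, if_pos hp]
        have hdrop : List.drop (o :: os).length (c :: t) = t.drop ((o :: os).length - 1) := by
          simp
        rw [hdrop]
        simp
      · rw [if_neg (by rw [List.isPrefixOf_iff_prefix]; exact hp),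
            ih _ _ (by simpa using Nat.le_of_succ_le_succ (by simpa using h)),
            repC_cons, if_neg hp]
        simp
theorem replace_eq (old new l : List Char) (hold : old ≠ []) :
    PySem.Chars.replace l old new = repC old new l := by
  have hne : old.isEmpty = false := by
    cases old with
    | nil => exact absurd rfl hold
    | cons o os => rfl
  unfold PySem.Chars.replace
  rw [if_neg (by simp [hne]), go_spec old new hold _ l [] le_rfl]
  simp

theorem rep_slash (l : List Char) : repC ['/'] ['-'] l = mS l := by
  induction l with
  | nil => rw [repC_nil]; rfl
  | cons c t ih =>
    by_cases h : c = '/'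
    · subst h
      rw [repC_cons, if_pos ⟨t, rfl⟩]
      simpa [mS, slashC] using ih
    · rw [repC_cons, if_neg (by rw [List.cons_prefix_cons]; exact fun hh => h hh.1.symm)]
      simp [mS, slashC, h] at ih ⊢
      exact ih

-- shape and goodness predicates for the key table
def keyOKb (k : List Char) : Bool := k.length == 3 && k.all (fun c => !c.isDigit && c != '/' && c != '-')
def valOKb (v : List Char) : Bool := v.length == 2 && v.all (·.isDigit)
def GoodK (K : List (List Char × List Char)) : Prop :=
  (∀ p ∈ K, keyOKb p.1 = true ∧ valOKb p.2 = true) ∧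
  (∀ p ∈ K, ∀ q ∈ K, p.1.take 2 ≠ q.1.drop 1 ∧ p.1.take 1 ≠ q.1.drop 2) ∧
  (∀ p ∈ K, ∀ q ∈ K, p.1 = q.1 → p.2 = q.2)

theorem goodKC : GoodK monthKC := by unfold GoodK monthKC; decide

theorem keyOK_shape (k : List Char) (h : keyOKb k = true) :
    ∃ a b c, k = [a, b, c] ∧ (a.isDigit = false ∧ a ≠ '/' ∧ a ≠ '-') ∧
      (b.isDigit = false ∧ b ≠ '/' ∧ b ≠ '-') ∧ (c.isDigit = false ∧ c ≠ '/' ∧ c ≠ '-') := by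
  rcases k with _ | ⟨a, _ | ⟨b, _ | ⟨c, _ | ⟨d, r⟩⟩⟩⟩
  · simp [keyOKb] at h
  · simp [keyOKb] at h
  · simp [keyOKb] at h
  · simp only [keyOKb, List.all_cons, List.all_nil, Bool.and_true, Bool.and_eq_true,
      beq_iff_eq, bne_iff_ne, Bool.not_eq_true'] at h
    refine ⟨a, b, c, rfl, ?_, ?_, ?_⟩ <;> tauto
  · simp [keyOKb] at h

theorem valOK_shape (v : List Char) (h : valOKb v = true) :
    ∃ d e, v = [d, e] ∧ d.isDigit = true ∧ e.isDigit = true := by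
  rcases v with _ | ⟨d, _ | ⟨e, _ | ⟨f, r⟩⟩⟩
  · simp [valOKb] at h
  · simp [valOKb] at h
  · simp only [valOKb, List.all_cons, List.all_nil, Bool.and_true, Bool.and_eq_true,
      beq_iff_eq] at h
    exact ⟨d, e, rfl, h.2.1, h.2.2⟩
  · simp [valOKb] at h

theorem keyOK_len (k : List Char) (h : keyOKb k = true) : k.length = 3 := by
  obtain ⟨a, b, c, rfl, -, -, -⟩ := keyOK_shape k h
  rfl

theorem keyOK_chars (k : List Char) (h : keyOKb k = true) : ∀ c ∈ k, c ≠ '/' ∧ c ≠ '-' := by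
  obtain ⟨a, b, c, rfl, ha, hb, hc⟩ := keyOK_shape k h
  intro x hx
  simp only [List.mem_cons, List.not_mem_nil, or_false] at hx
  rcases hx with rfl | rfl | rfl
  · exact ⟨ha.2.1, ha.2.2⟩
  · exact ⟨hb.2.1, hb.2.2⟩
  · exact ⟨hc.2.1, hc.2.2⟩

theorem valOK_digits (v : List Char) (h : valOKb v = true) : ∀ c ∈ v, c.isDigit = true := by
  obtain ⟨d, e, rfl, hd, he⟩ := valOK_shape v h
  intro x hx
  simp only [List.mem_cons, List.not_mem_nil, or_false] at hx
  rcases hx with rfl | rfl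
  · exact hd
  · exact he

theorem digit_ne_slash (c : Char) (h : c.isDigit = true) : c ≠ '/' := by
  intro hh
  subst hh
  exact absurd h (by decide)

theorem mS_of_no_slash : ∀ v : List Char, (∀ c ∈ v, c ≠ '/') → mS v = v := by
  intro v
  induction v with
  | nil => intro _; rfl
  | cons c t ih =>
    intro hv
    show slashC c :: mS t = c :: t
    rw [ih (fun x hx => hv x (List.mem_cons_of_mem _ hx))]
    have : slashC c = c := by
      unfold slashC
      rw [if_neg (by simpa using hv c (List.mem_cons_self ..))]
    rw [this]

theorem mS_idem (l : List Char) : mS (mS l) = mS l := by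
  unfold mS
  rw [List.map_map]
  apply List.map_congr_left
  intro c _
  by_cases h : c = '/' <;> simp [slashC, h]

theorem rep_cons_neg (old new : List Char) (c : Char) (t : List Char) (h : ¬ old <+: c :: t) :
    repC old new (c :: t) = c :: repC old new t := by
  rw [repC_cons, if_neg h]

theorem rep_key (a b c : Char) (v X : List Char) :
    repC [a,b,c] v ([a,b,c] ++ X) = v ++ repC [a,b,c] v X := by
  rw [show ([a,b,c] ++ X) = a :: b :: c :: X from rfl, repC_cons,
      if_pos (show [a,b,c] <+: a :: b :: c :: X from ⟨X, rfl⟩)]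
  simp

theorem rep_id (k v l : List Char) (h : ¬ k <:+: l) : repC k v l = l := by
  induction l with
  | nil => exact repC_nil k v
  | cons c t ih =>
    rw [rep_cons_neg _ _ _ _ (fun hp => h hp.isInfix),
        ih (fun hi => h (List.infix_cons hi))]

theorem rep_front_digit (p q : List Char) (hp : keyOKb p = true) :
    ∀ w Y : List Char, (∀ c ∈ w, c.isDigit = true) → repC p q (w ++ Y) = w ++ repC p q Y := by
  obtain ⟨a, b, c, rfl, ha, hb, hc⟩ := keyOK_shape p hp
  intro w
  induction w with
  | nil => intro Y _; rfl
  | cons d w' ih =>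
    intro Y hw
    have hd : d.isDigit = true := hw d (List.mem_cons_self ..)
    have hpre : ¬ [a,b,c] <+: d :: (w' ++ Y) := by
      intro hx
      obtain ⟨had, -⟩ := List.cons_prefix_cons.mp hx
      rw [had] at ha
      exact absurd hd (by simp [ha.1])
    rw [List.cons_append, rep_cons_neg _ _ _ _ hpre,
        ih Y (fun x hx => hw x (List.mem_cons_of_mem _ hx))]
    rfl

theorem rep_front_key (p u k : List Char) (hp : keyOKb p = true) (hk : keyOKb k = true)
    (hne : p ≠ k) (h1 : p.take 2 ≠ k.drop 1) (h2 : p.take 1 ≠ k.drop 2) (Y : List Char) :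
    repC p u (k ++ Y) = k ++ repC p u Y := by
  obtain ⟨a, b, c, rfl, -, -, -⟩ := keyOK_shape k hk
  obtain ⟨x, y, z, rfl, -, -, -⟩ := keyOK_shape p hp
  have g1 : ¬ [x,y,z] <+: a :: b :: c :: Y := by
    intro hx
    obtain ⟨e1, hx2⟩ := List.cons_prefix_cons.mp hx
    obtain ⟨e2, hx3⟩ := List.cons_prefix_cons.mp hx2
    obtain ⟨e3, -⟩ := List.cons_prefix_cons.mp hx3
    exact hne (by rw [e1, e2, e3])
  have g2 : ¬ [x,y,z] <+: b :: c :: Y := by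
    intro hx
    obtain ⟨e1, hx2⟩ := List.cons_prefix_cons.mp hx
    obtain ⟨e2, -⟩ := List.cons_prefix_cons.mp hx2
    exact h1 (by simp [e1, e2])
  have g3 : ¬ [x,y,z] <+: c :: Y := by
    intro hx
    obtain ⟨e1, -⟩ := List.cons_prefix_cons.mp hx
    exact h2 (by simp [e1])
  rw [show ([a,b,c] ++ Y) = a :: b :: c :: Y from rfl,
      rep_cons_neg _ _ _ _ g1, rep_cons_neg _ _ _ _ g2, rep_cons_neg _ _ _ _ g3]
  rfl

theorem prefix_cons_rep (p k v : List Char) (hp : keyOKb p = true) (hk : keyOKb k = true)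
    (hv : valOKb v = true) (h1 : k.take 2 ≠ p.drop 1) (h2 : k.take 1 ≠ p.drop 2)
    (x : Char) (t : List Char) :
    (p <+: x :: repC k v t) ↔ (p <+: x :: t) := by
  obtain ⟨a, b, c, rfl, ha, hb, hc⟩ := keyOK_shape k hk
  obtain ⟨p0, p1, p2, rfl, hp0, hp1, hp2⟩ := keyOK_shape p hp
  obtain ⟨d0, d1, rfl, hd0, hd1⟩ := valOK_shape v hv
  cases t with
  | nil =>
    rw [repC_nil]
  | cons e t' =>
    by_cases hk1 : [a,b,c] <+: e :: t'
    · obtain ⟨X, hX⟩ := hk1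
      rw [← hX, rep_key]
      constructor
      · intro hx
        exfalso
        obtain ⟨-, hx2⟩ := List.cons_prefix_cons.mp hx
        obtain ⟨hy, -⟩ := List.cons_prefix_cons.mp hx2
        rw [hy] at hp1
        exact absurd hd0 (by simp [hp1.1])
      · intro hx
        exfalso
        obtain ⟨-, hx2⟩ := List.cons_prefix_cons.mp hx
        obtain ⟨hy, hx3⟩ := List.cons_prefix_cons.mp hx2
        obtain ⟨hz, -⟩ := List.cons_prefix_cons.mp hx3
        exact h1 (by simp [hy, hz])
    · rw [rep_cons_neg _ _ _ _ hk1]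
      simp only [List.cons_prefix_cons]
      refine and_congr_right fun _ => and_congr_right fun _ => ?_
      cases t' with
      | nil =>
        rw [repC_nil]
      | cons f t'' =>
        by_cases hk2 : [a,b,c] <+: f :: t''
        · obtain ⟨X, hX⟩ := hk2
          rw [← hX, rep_key]
          constructor
          · intro hx
            exfalso
            obtain ⟨hy, -⟩ := List.cons_prefix_cons.mp hx
            rw [hy] at hp2
            exact absurd hd0 (by simp [hp2.1])
          · intro hx
            exfalso
            obtain ⟨hy, -⟩ := List.cons_prefix_cons.mp hx
            exact h2 (by simp [hy])
        · rw [rep_cons_neg _ _ _ _ hk2]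
          simp [List.cons_prefix_cons]

theorem prefix_mS : ∀ (p l : List Char), (∀ c ∈ p, c ≠ '/' ∧ c ≠ '-') →
    ((p <+: mS l) ↔ (p <+: l)) := by
  intro p
  induction p with
  | nil => intro l _; simp
  | cons c p' ih =>
    intro l hp
    cases l with
    | nil => simp [mS]
    | cons x t =>
      have hc := hp c (List.mem_cons_self ..)
      show (c :: p' <+: slashC x :: mS t) ↔ _
      rw [List.cons_prefix_cons, List.cons_prefix_cons]
      have hcx : (c = slashC x) ↔ (c = x) := by
        by_cases hx : x = '/'
        · subst hx
          simp [slashC, hc.1, hc.2]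
        · unfold slashC
          rw [if_neg (by simpa using hx)]
      exact and_congr hcx (ih t (fun y hy => hp y (List.mem_cons_of_mem _ hy)))

theorem rep_mS (k v : List Char) (hk : keyOKb k = true) (hv : valOKb v = true) :
    ∀ l, repC k v (mS l) = mS (repC k v l) := by
  have hkchars := keyOK_chars k hk
  have hmv : mS v = v := mS_of_no_slash v (fun c hc => digit_ne_slash c (valOK_digits v hv c hc))
  have hmain : ∀ n, ∀ l : List Char, l.length ≤ n → repC k v (mS l) = mS (repC k v l) := by
    intro n
    induction n with
    | zero =>
      intro l h
      have hl : l = [] := by cases l with | nil => rfl | cons a t => simp at h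
      subst hl
      simp only [mS, List.map_nil, repC_nil]
    | succ n ih =>
      intro l h
      cases l with
      | nil =>
        simp only [mS, List.map_nil, repC_nil]
      | cons x t =>
        have hms : mS (x :: t) = slashC x :: mS t := rfl
        by_cases hpre : k <+: x :: t
        · have hpre' : k <+: slashC x :: mS t := by
            rw [← hms]
            exact (prefix_mS k (x :: t) hkchars).mpr hpre
          rw [hms, repC_cons, if_pos hpre', repC_cons, if_pos hpre]
          have hdrop : (mS t).drop (k.length - 1) = mS (t.drop (k.length - 1)) := by
            simp [mS]
          rw [hdrop, ih _ (by simp only [List.length_cons, List.length_drop] at h ⊢; omega)]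
          rw [show mS (v ++ repC k v (t.drop (k.length - 1)))
                = mS v ++ mS (repC k v (t.drop (k.length - 1))) from by simp [mS], hmv]
        · have hpre' : ¬ k <+: slashC x :: mS t := by
            rw [← hms]
            exact fun hh => hpre ((prefix_mS k (x :: t) hkchars).mp hh)
          rw [hms, repC_cons, if_neg hpre', repC_cons, if_neg hpre,
              ih _ (by simp only [List.length_cons] at h; omega)]
          rfl
  exact fun l => hmain l.length l le_rfl

-- A's per-key step and the two folds
def stepA (t : List Char) (p : List Char × List Char) : List Char :=
  if p.1 <:+: t then mS (repC p.1 p.2 t) else t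
def afC (K : List (List Char × List Char)) (l : List Char) : List Char := K.foldl stepA l
def mfC (K : List (List Char × List Char)) (l : List Char) : List Char :=
  K.foldl (fun t p => repC p.1 p.2 t) l

theorem afC_cons (q : List Char × List Char) (K : List (List Char × List Char)) (l : List Char) :
    afC (q :: K) l = afC K (stepA l q) := rfl
theorem mfC_cons (q : List Char × List Char) (K : List (List Char × List Char)) (l : List Char) :
    mfC (q :: K) l = mfC K (repC q.1 q.2 l) := rfl

theorem GoodK_tail (p : List Char × List Char) (K : List (List Char × List Char))
    (h : GoodK (p :: K)) : GoodK K :=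
  ⟨fun q hq => h.1 q (List.mem_cons_of_mem _ hq),
   fun q hq r hr => h.2.1 q (List.mem_cons_of_mem _ hq) r (List.mem_cons_of_mem _ hr),
   fun q hq r hr => h.2.2 q (List.mem_cons_of_mem _ hq) r (List.mem_cons_of_mem _ hr)⟩

theorem mf_mS : ∀ K : List (List Char × List Char), GoodK K →
    ∀ l, mfC K (mS l) = mS (mfC K l) := by
  intro K
  induction K with
  | nil => intro _ l; rfl
  | cons q K' ih =>
    intro hK l
    have hq := hK.1 q (List.mem_cons_self ..)
    rw [mfC_cons, mfC_cons, rep_mS q.1 q.2 hq.1 hq.2 l, ih (GoodK_tail _ _ hK)]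

theorem L1 : ∀ K : List (List Char × List Char), GoodK K → ∀ l,
    afC K l = if (∃ p ∈ K, p.1 <:+: l) then mS (mfC K l) else mfC K l := by
  intro K
  induction K with
  | nil => intro _ l; simp [afC, mfC]
  | cons q K' ih =>
    intro hK l
    have hq := hK.1 q (List.mem_cons_self ..)
    have htail := GoodK_tail q K' hK
    by_cases hc : q.1 <:+: l
    · have h1 : afC (q :: K') l = afC K' (mS (repC q.1 q.2 l)) := by
        rw [afC_cons]
        congr 1
        simp [stepA, hc]
      rw [h1, ih htail, mf_mS K' htail, mfC_cons,
          if_pos (⟨q, List.mem_cons_self .., hc⟩ : ∃ p ∈ q :: K', p.1 <:+: l)]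
      by_cases h2 : ∃ p ∈ K', p.1 <:+: mS (repC q.1 q.2 l)
      · rw [if_pos h2, mS_idem]
      · rw [if_neg h2]
    · have hrep : repC q.1 q.2 l = l := rep_id _ _ _ hc
      have h1 : afC (q :: K') l = afC K' l := by
        rw [afC_cons]
        congr 1
        simp [stepA, hc]
      rw [h1, ih htail, mfC_cons, hrep]
      by_cases h2 : ∃ p ∈ K', p.1 <:+: l
      · obtain ⟨p, hp, hi⟩ := h2
        rw [if_pos ⟨p, hp, hi⟩, if_pos ⟨p, List.mem_cons_of_mem _ hp, hi⟩]
      · rw [if_neg h2, if_neg (by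
          rintro ⟨p, hp, hi⟩
          rcases List.mem_cons.mp hp with rfl | hp'
          · exact hc hi
          · exact h2 ⟨p, hp', hi⟩)]

theorem fold_cons (c : Char) : ∀ K : List (List Char × List Char), GoodK K →
    ∀ t, (∀ p ∈ K, ¬ p.1 <+: c :: t) → mfC K (c :: t) = c :: mfC K t := by
  intro K
  induction K with
  | nil => intro _ t _; rfl
  | cons q K' ih =>
    intro hK t h
    have hq := hK.1 q (List.mem_cons_self ..)
    rw [mfC_cons, rep_cons_neg _ _ _ _ (h q (List.mem_cons_self ..)), mfC_cons]
    apply ih (GoodK_tail _ _ hK)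
    intro p hp
    rw [prefix_cons_rep p.1 q.1 q.2 (hK.1 p (List.mem_cons_of_mem _ hp)).1 hq.1 hq.2
          (hK.2.1 q (List.mem_cons_self ..) p (List.mem_cons_of_mem _ hp)).1
          (hK.2.1 q (List.mem_cons_self ..) p (List.mem_cons_of_mem _ hp)).2]
    exact h p (List.mem_cons_of_mem _ hp)

theorem fold_front_digit : ∀ K : List (List Char × List Char), GoodK K →
    ∀ (w : List Char), (∀ c ∈ w, c.isDigit = true) → ∀ Y, mfC K (w ++ Y) = w ++ mfC K Y := by
  intro K
  induction K with
  | nil => intro _ w _ Y; rfl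
  | cons q K' ih =>
    intro hK w hw Y
    have hq := hK.1 q (List.mem_cons_self ..)
    rw [mfC_cons, rep_front_digit q.1 q.2 hq.1 w Y hw, mfC_cons]
    exact ih (GoodK_tail _ _ hK) w hw _

theorem fold_key : ∀ K : List (List Char × List Char), GoodK K → ∀ k v X,
    (k, v) ∈ K → mfC K (k ++ X) = v ++ mfC K X := by
  intro K
  induction K with
  | nil => intro _ k v X h; cases h
  | cons q K' ih =>
    intro hK k v X hm
    have hq := hK.1 q (List.mem_cons_self ..)
    rw [mfC_cons, mfC_cons]
    by_cases hqk : q.1 = k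
    · have hqv : q.2 = v := by
        rcases List.mem_cons.mp hm with h | h
        · rw [← h]
        · exact hK.2.2 q (List.mem_cons_self ..) (k, v) (List.mem_cons_of_mem _ h) hqk
      obtain ⟨a, b, c2, hkeq, -, -, -⟩ := keyOK_shape k (by rw [← hqk]; exact hq.1)
      rw [hqk, hqv, hkeq, rep_key]
      have hvd : ∀ c ∈ v, c.isDigit = true := by
        apply valOK_digits
        rw [← hqv]
        exact hq.2
      exact fold_front_digit K' (GoodK_tail _ _ hK) v hvd _
    · have hm' : (k, v) ∈ K' := by
        rcases List.mem_cons.mp hm with h | h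
        · exact absurd (by rw [← h]) hqk
        · exact h
      rw [rep_front_key q.1 q.2 k hq.1 (hK.1 (k, v) hm).1 hqk
            (hK.2.1 q (List.mem_cons_self ..) (k, v) hm).1
            (hK.2.1 q (List.mem_cons_self ..) (k, v) hm).2 X]
      exact ih (GoodK_tail _ _ hK) k v _ hm'

theorem fold_small : ∀ K : List (List Char × List Char), GoodK K →
    ∀ l : List Char, l.length < 3 → mfC K l = l := by
  intro K
  induction K with
  | nil => intro _ l _; rfl
  | cons q K' ih =>
    intro hK l hl
    have hq := hK.1 q (List.mem_cons_self ..)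
    have hni : ¬ q.1 <:+: l := by
      intro hi
      have h1 := hi.length_le
      have h2 := keyOK_len _ hq.1
      omega
    rw [mfC_cons, rep_id q.1 q.2 l hni]
    exact ih (GoodK_tail _ _ hK) l hl

theorem subn_nil : subnMonths [] = ([], 0) := by rw [subnMonths]; intro _ _ _ _ h; cases h
theorem subn_one (c : Char) : subnMonths [c] = ([c], 0) := by
  rw [subnMonths]; intro _ _ _ _ h; cases h
theorem subn_two (c d : Char) : subnMonths [c, d] = ([c, d], 0) := by
  rw [subnMonths]; intro _ _ _ _ h; cases h
theorem subn_cons3 (c0 c1 c2 : Char) (rest : List Char) :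
    subnMonths (c0 :: c1 :: c2 :: rest) =
      match monthSub c0 c1 c2 with
      | some v => let p := subnMonths rest; (v ++ p.1, p.2 + 1)
      | none => let p := subnMonths (c1 :: c2 :: rest); (c0 :: p.1, p.2) := by
  rw [subnMonths]

theorem no_key_small (l : List Char) (hl : l.length < 3) : ¬ ∃ p ∈ monthKC, p.1 <:+: l := by
  rintro ⟨p, hp, hi⟩
  have h1 := keyOK_len _ (goodKC.1 p hp).1
  have h2 := hi.length_le
  omega

theorem masterN : ∀ n, ∀ l : List Char, l.length ≤ n →
    mfC monthKC l = (subnMonths l).1 ∧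
      ((subnMonths l).2 > 0 ↔ ∃ p ∈ monthKC, p.1 <:+: l) := by
  intro n
  induction n with
  | zero =>
    intro l h
    have hl : l = [] := by cases l with | nil => rfl | cons a t => simp at h
    subst hl
    rw [subn_nil]
    exact ⟨fold_small _ goodKC _ (by simp),
      ⟨fun hh => absurd hh (by omega), fun hx => absurd hx (no_key_small _ (by simp))⟩⟩
  | succ n ih =>
    intro l h
    match l with
    | [] =>
      rw [subn_nil]
      exact ⟨fold_small _ goodKC _ (by simp),
        ⟨fun hh => absurd hh (by omega), fun hx => absurd hx (no_key_small _ (by simp))⟩⟩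
    | [c] =>
      rw [subn_one]
      exact ⟨fold_small _ goodKC _ (by simp),
        ⟨fun hh => absurd hh (by omega), fun hx => absurd hx (no_key_small _ (by simp))⟩⟩
    | [c, d] =>
      rw [subn_two]
      exact ⟨fold_small _ goodKC _ (by simp),
        ⟨fun hh => absurd hh (by omega), fun hx => absurd hx (no_key_small _ (by simp))⟩⟩
    | c0 :: c1 :: c2 :: rest =>
      rw [subn_cons3]
      cases hms : monthSub c0 c1 c2 with
      | some v =>
        have hmem : ([c0, c1, c2], v) ∈ monthKC := by
          unfold monthSub at hms
          cases hf : monthKC.find? (fun p => p.1 == [c0, c1, c2]) with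
          | none => rw [hf] at hms; simp at hms
          | some q =>
            rw [hf] at hms
            simp only [Option.map_some, Option.some.injEq] at hms
            have hq1 : q.1 = [c0, c1, c2] := by simpa using List.find?_some hf
            have hq2 := List.mem_of_find?_eq_some hf
            rwa [show q = ([c0, c1, c2], v) from Prod.ext hq1 hms] at hq2
        have hlen : rest.length ≤ n := by
          simp only [List.length_cons] at h
          omega
        constructor
        · rw [show (c0 :: c1 :: c2 :: rest) = [c0, c1, c2] ++ rest from rfl,
              fold_key monthKC goodKC _ _ _ hmem, (ih rest hlen).1]
        · constructor
          · intro _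
            exact ⟨([c0, c1, c2], v), hmem, (List.prefix_append [c0, c1, c2] rest).isInfix⟩
          · intro _
            show (subnMonths rest).2 + 1 > 0
            omega
      | none =>
        have hfind : monthKC.find? (fun p => p.1 == [c0, c1, c2]) = none := by
          cases hf : monthKC.find? (fun p => p.1 == [c0, c1, c2]) with
          | none => rfl
          | some q =>
            unfold monthSub at hms
            rw [hf] at hms
            simp at hms
        have hnone : ∀ p ∈ monthKC, ¬ p.1 <+: (c0 :: c1 :: c2 :: rest) := by
          intro p hp hpre
          have h3 := keyOK_len _ (goodKC.1 p hp).1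
          have h4 : p.1 = [c0, c1, c2] := by
            have h5 := List.prefix_iff_eq_take.mp hpre
            rw [h3] at h5
            simpa using h5
          have h6 := List.find?_eq_none.mp hfind p hp
          simp [h4] at h6
        have hlen : (c1 :: c2 :: rest).length ≤ n := by
          simp only [List.length_cons] at h ⊢
          omega
        constructor
        · rw [fold_cons c0 monthKC goodKC _ hnone, (ih _ hlen).1]
        · show (subnMonths (c1 :: c2 :: rest)).2 > 0 ↔ _
          rw [(ih _ hlen).2]
          constructor
          · rintro ⟨p, hp, hi⟩
            exact ⟨p, hp, List.infix_cons hi⟩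
          · rintro ⟨p, hp, hi⟩
            rcases List.infix_cons_iff.mp hi with hpre | hi'
            · exact absurd hpre (hnone p hp)
            · exact ⟨p, hp, hi'⟩

theorem master (l : List Char) :
    mfC monthKC l = (subnMonths l).1 ∧
      ((subnMonths l).2 > 0 ↔ ∃ p ∈ monthKC, p.1 <:+: l) :=
  masterN l.length l le_rfl

theorem chars_final (l : List Char) :
    afC monthKC l =
      (if (subnMonths l).2 > 0 then mS (subnMonths l).1 else (subnMonths l).1) := by
  rw [L1 monthKC goodKC l]
  have hm := master l
  by_cases h : (subnMonths l).2 > 0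
  · rw [if_pos h, if_pos (hm.2.mp h), hm.1]
  · rw [if_neg h, if_neg (fun hx => h (hm.2.mpr hx)), hm.1]

-- string-level fold of A over explicit pairs
def AstrFold (ps : List (String × String)) (s : String) : String :=
  ps.foldl (fun t p =>
    if PySem.Str.isIn p.1 t then PySem.Str.replace (PySem.Str.replace t p.1 p.2) "/" "-" else t) s

theorem convert_eq_AstrFold (s : String) : convert s = AstrFold monthPairs s := by
  rfl

theorem sstep_toList (m mm t : String) (hm : m.toList ≠ []) :
    (if PySem.Str.isIn m t then PySem.Str.replace (PySem.Str.replace t m mm) "/" "-" else t).toList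
      = stepA t.toList (m.toList, mm.toList) := by
  by_cases h : m.toList <:+: t.toList
  · rw [if_pos (by rw [PySem.Str.isIn_eq]; exact (PySem.Chars.isIn_iff_infix _ _).mpr h)]
    rw [PySem.Str.toList_replace, PySem.Str.toList_replace,
        show ("/" : String).toList = ['/'] from rfl, show ("-" : String).toList = ['-'] from rfl,
        replace_eq m.toList mm.toList t.toList hm, replace_eq _ _ _ (by simp), rep_slash]
    simp [stepA, h]
  · rw [if_neg (by
      rw [PySem.Str.isIn_eq]
      exact fun hh => h ((PySem.Chars.isIn_iff_infix _ _).mp hh))]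
    simp [stepA, h]

theorem AstrFold_toList : ∀ (ps : List (String × String)) (t : String), (∀ p ∈ ps, p.1 ≠ "") →
    (AstrFold ps t).toList = afC (ps.map (fun p => (p.1.toList, p.2.toList))) t.toList := by
  intro ps
  induction ps with
  | nil => intro t _; rfl
  | cons q ps' ih =>
    intro t hps
    have hq : q.1.toList ≠ [] := by
      simpa [String.toList_eq_nil_iff] using hps q (List.mem_cons_self ..)
    show (AstrFold ps' _).toList = _
    rw [ih _ (fun p hp => hps p (List.mem_cons_of_mem _ hp)), sstep_toList q.1 q.2 t hq]
    rfl

-- ===== VERDICT (by name: the statement is the Claim_ definition above) =====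
theorem convert_spec : Claim_equal_convert := by
  intro s _
  unfold Spec_convert
  apply String.ext
  have hmap : monthPairs.map (fun p => (p.1.toList, p.2.toList)) = monthKC := by decide
  have hA : (convert s).toList = afC monthKC s.toList := by
    rw [convert_eq_AstrFold, AstrFold_toList monthPairs s (by decide), hmap]
  have hB : (convert_alt s).toList =
      (if (subnMonths s.toList).2 > 0 then mS (subnMonths s.toList).1
       else (subnMonths s.toList).1) := by
    unfold convert_alt mS slashC
    by_cases hn : (subnMonths s.toList).2 > 0
    · simp [hn]
    · simp [hn]
  rw [hA, hB, chars_final]
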